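-- pv_equiv track=rewrite | github.com/darthSoura/Design-and-Analysis-of-Algorithms | fixed_length_encoding.py | fixed_length_encoding
-- ===== SOURCE A (Python) =====
-- import math
--
-- def num_bits(n):
--     return 1 if n == 0 else int(math.log2(n)) + 1
--
-- def fixed_length_encoding(freq_dict):
--
--     symbols = freq_dict.keys()
--     num_symbols = len(symbols)
--     max_bits = num_bits(num_symbols - 1)
--
--     encoding_dict = {}
--
--     for i, symbol in enumerate(symbols):
--         binary_str = format(i, '0' + str(max_bits) + 'b')
--         encoding_dict[symbol] = binary_str
--
--     weighted_average = 0
--     for symbol, freq in freq_dict.items():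
--         encoding_length = len(encoding_dict[symbol])
--         weighted_average += freq * encoding_length
--
--     return encoding_dict, weighted_average
-- ===== SOURCE B (Python) =====
-- def fixed_length_encoding(freq_dict):
--     symbols = list(freq_dict)
--     n = len(symbols)
--     # Grow the code table by doubling: prefix '0' then '1' to every shorter code
--     # until the table covers all symbols (and is at least 1 bit wide).
--     codes = ['']
--     while len(codes) < max(n, 2):
--         codes = [b + c for b in '01' for c in codes]
--     encoding_dict = dict(zip(symbols, codes))
--     return encoding_dict, len(codes[0]) * sum(freq_dict.values())
-- ===== Notes on version B (the rewrite author's own statement) =====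
-- stated objective: alternative
-- what changed: B builds the entire code table by repeated doubling (prefixing '0'/'1' to every shorter code) instead of formatting each index individually, attaches codes to symbols with a single zip instead of an enumerate loop, and replaces A's second lookup-and-sum pass by the closed form (code width) * sum(values).
import Mathlib
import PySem

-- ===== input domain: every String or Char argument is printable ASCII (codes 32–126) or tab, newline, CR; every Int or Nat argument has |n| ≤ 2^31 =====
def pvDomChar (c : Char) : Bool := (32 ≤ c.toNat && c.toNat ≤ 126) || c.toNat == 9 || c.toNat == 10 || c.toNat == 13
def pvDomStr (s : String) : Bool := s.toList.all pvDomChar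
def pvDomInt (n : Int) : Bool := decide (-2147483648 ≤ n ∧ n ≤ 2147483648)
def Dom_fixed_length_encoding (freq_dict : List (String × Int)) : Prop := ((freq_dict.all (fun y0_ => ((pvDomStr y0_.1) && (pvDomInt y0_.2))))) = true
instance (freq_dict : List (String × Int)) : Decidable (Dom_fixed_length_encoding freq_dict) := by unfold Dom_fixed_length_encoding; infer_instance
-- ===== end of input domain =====

-- B builds the whole code table by doubling (prefixing '0'/'1' to every shorter code) instead of
-- formatting each index, pairs it with the symbols by zip, and replaces A's second summation pass
-- by the closed form (code width) * sum(values); objective: alternative.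

-- A-side helper: format(i, '0{w}b') — MSB-first binary of i zero-padded to width w.
-- Ported by hand: exact for i ≥ 0 (the only values A formats).
def binChars : Nat → List Char
  | 0 => []
  | (n+1) => binChars ((n+1)/2) ++ [if (n+1) % 2 = 1 then '1' else '0']
decreasing_by exact Nat.div_lt_self (Nat.succ_pos n) (by norm_num)

def pyFormatBin0 (i : Int) (w : Nat) : String :=
  let s := if i = 0 then ['0'] else binChars i.toNat
  String.ofList (List.replicate (w - s.length) '0' ++ s)

-- ===== PORT A =====
-- int(math.log2(n)) + 1 ported as Nat.log 2 n + 1 (exact floor log for n ≥ 1 at the sizes reached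
-- here); math.log2 raises ValueError for n < 0 (the empty dict), which Pre_ excludes.
def num_bits (n : Int) : Int := if n = 0 then 1 else (Nat.log 2 n.toNat : Int) + 1

def fixed_length_encoding (freq_dict : List (String × Int)) : (List (String × String)) × Int :=
  let symbols := freq_dict.map Prod.fst
  let num_symbols : Int := symbols.length
  let max_bits := num_bits (num_symbols - 1)
  let encoding_dict : PySem.Dict String String :=
    (PySem.List.enumerate symbols).foldl
      (fun d p => d.insert p.2 (pyFormatBin0 p.1 max_bits.toNat)) PySem.Dict.empty
  -- encoding_dict[symbol]: KeyError impossible — the dict was built from exactly these keys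
  let weighted_average := freq_dict.foldl
      (fun acc p => acc + p.2 * PySem.Str.len (encoding_dict.getD p.1 "")) 0
  (encoding_dict.items, weighted_average)

-- ===== PORT B =====
-- the while-loop 'while len(codes) < target: codes = [b + c for b in '01' for c in codes]',
-- ported with a fuel bound (target + 1 always suffices: the table doubles every pass)
def growCodes : Nat → Nat → List (List Char) → List (List Char)
  | 0, _, codes => codes
  | fuel+1, target, codes =>
    if codes.length < target then
      growCodes fuel target ((['0', '1'] : List Char).flatMap (fun b => codes.map (fun c => b :: c)))
    else codes

def fixed_length_encoding_alt (freq_dict : List (String × Int)) : (List (String × String)) × Int :=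
  let symbols := freq_dict.map Prod.fst
  let n := symbols.length
  let codes := growCodes (max n 2 + 1) (max n 2) [[]]
  -- dict(zip(symbols, codes))
  let encoding_dict : PySem.Dict String String :=
    (symbols.zip (codes.map String.ofList)).foldl
      (fun d p => d.insert p.1 p.2) PySem.Dict.empty
  -- codes[0]: codes is never empty (it starts as [''] and only grows)
  (encoding_dict.items, ((codes.headD []).length : Int) * (freq_dict.map Prod.snd).sum)

-- ===== PRECONDITION & SPEC =====
-- Pre_ excludes (1) the empty list, on which A raises ValueError (math.log2(-1)), and (2) lists with
-- duplicate keys, which do not represent a Python dict (A's argument is a dict, whose keys are distinct).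
def Pre_fixed_length_encoding (freq_dict : List (String × Int)) : Prop :=
  freq_dict ≠ [] ∧ (freq_dict.map Prod.fst).Nodup
instance (freq_dict : List (String × Int)) : Decidable (Pre_fixed_length_encoding freq_dict) := by
  unfold Pre_fixed_length_encoding; infer_instance

def pvWitness_fixed_length_encoding : (List (String × Int)) := [("a", 5), ("b", 2), ("c", 1)]

def Spec_fixed_length_encoding (freq_dict : List (String × Int)) (out : (List (String × String)) × Int) : Prop := out = fixed_length_encoding_alt freq_dict
instance (freq_dict : List (String × Int)) (out : (List (String × String)) × Int) : Decidable (Spec_fixed_length_encoding freq_dict out) := by unfold Spec_fixed_length_encoding; infer_instance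

-- ===== CLAIM (what is proved, stated in full; the proofs are below) =====
def Claim_equal_fixed_length_encoding : Prop := ∀ (freq_dict : List (String × Int)), Dom_fixed_length_encoding freq_dict → Pre_fixed_length_encoding freq_dict → Spec_fixed_length_encoding freq_dict (fixed_length_encoding freq_dict)

-- ===== LEMMAS AND PROOFS =====

-- the digit list and fixed-width padding, as plain functions on Nat
def bitsOf (k : Nat) : List Char := if k = 0 then ['0'] else binChars k
def padList (w k : Nat) : List Char := List.replicate (w - (bitsOf k).length) '0' ++ bitsOf k
-- the code table B has built after j doubling passes
def iter (j : Nat) : List (List Char) := (List.range (2^j)).map (padList j)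

lemma pyFormatBin0_natCast (k w : Nat) : pyFormatBin0 (k : Int) w = String.ofList (padList w k) := by
  simp [pyFormatBin0, padList, bitsOf, Int.toNat_natCast]

lemma binChars_eq (m : Nat) (hm : 1 ≤ m) :
    binChars m = binChars (m/2) ++ [if m % 2 = 1 then '1' else '0'] := by
  match m, hm with
  | (n+1), _ => rw [binChars]

lemma binChars_one : binChars 1 = ['1'] := by
  rw [binChars_eq 1 le_rfl]; norm_num [binChars]

lemma binChars_length (m : Nat) (hm : 1 ≤ m) : (binChars m).length = Nat.log 2 m + 1 := by
  induction m using Nat.strong_induction_on with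
  | _ m ih =>
    match m, hm with
    | (n+1), _ =>
      rw [binChars]
      rcases Nat.lt_or_ge (n+1) 2 with h2 | h2
      · have hn0 : n = 0 := by omega
        subst hn0; norm_num [binChars]
      · have hd1 : 1 ≤ (n+1)/2 := Nat.one_le_div_iff (by norm_num) |>.mpr h2
        have hdlt : (n+1)/2 < n+1 := Nat.div_lt_self (Nat.succ_pos n) (by norm_num)
        have hlog : Nat.log 2 ((n+1)/2) = Nat.log 2 (n+1) - 1 := Nat.log_div_base 2 (n+1)
        have hpos : 0 < Nat.log 2 (n+1) := Nat.log_pos (by norm_num) h2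
        simp only [List.length_append, List.length_cons, List.length_nil, ih _ hdlt hd1]
        omega

lemma bitLength_natCast_eq (m : Nat) (hm : 1 ≤ m) :
    PySem.Int.bitLength (m : Int) = Nat.log 2 m + 1 := by
  have h1 := PySem.Int.lt_two_pow_bitLength (m : Int)
  have h2 := PySem.Int.two_pow_bitLength_le (m : Int)
      (by exact_mod_cast Nat.one_le_iff_ne_zero.mp hm)
  rw [Int.natAbs_natCast] at h1 h2
  have hL : 1 ≤ PySem.Int.bitLength (m : Int) := by
    by_contra h
    have : PySem.Int.bitLength (m : Int) = 0 := by omega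
    rw [this] at h1; omega
  have := Nat.log_eq_of_pow_le_of_lt_pow h2 (by
    have : PySem.Int.bitLength (m : Int) - 1 + 1 = PySem.Int.bitLength (m : Int) := by omega
    rw [this]; exact h1)
  omega

lemma bitsOf_length_le (j k : Nat) (hj : 1 ≤ j) (hk : k < 2^j) : (bitsOf k).length ≤ j := by
  by_cases h0 : k = 0
  · subst h0; simp [bitsOf]; omega
  · rw [bitsOf, if_neg h0, binChars_length k (Nat.one_le_iff_ne_zero.mpr h0)]
    have : Nat.log 2 k < j := Nat.log_lt_of_lt_pow h0 hk
    omega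

lemma binChars_pow (j : Nat) : binChars (2^j) = '1' :: List.replicate j '0' := by
  induction j with
  | zero => simpa using binChars_one
  | succ j ih =>
    have h1 : 1 ≤ 2^(j+1) := Nat.one_le_two_pow
    rw [binChars_eq _ h1]
    have hdiv : 2^(j+1) / 2 = 2^j := by
      rw [pow_succ, Nat.mul_div_cancel _ (by norm_num)]
    have hmod : 2^(j+1) % 2 = 0 := by
      rw [pow_succ]; omega
    rw [hdiv, hmod, ih]
    simp [List.replicate_succ' (n := j)]

lemma binChars_pow_add (j : Nat) : ∀ k, 1 ≤ k → k < 2^j →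
    binChars (2^j + k) = '1' :: (List.replicate (j - (binChars k).length) '0' ++ binChars k) := by
  induction j with
  | zero => intro k hk1 hk2; omega
  | succ j ih =>
    intro k hk1 hk2
    have h1 : 1 ≤ 2^(j+1) + k := by
      have := Nat.one_le_two_pow (n := j+1); omega
    rw [binChars_eq _ h1]
    have hp : (2:Nat)^(j+1) = 2 * 2^j := by ring
    have hdiv : (2^(j+1) + k) / 2 = 2^j + k / 2 := by omega
    have hmod : (2^(j+1) + k) % 2 = k % 2 := by omega
    rw [hdiv, hmod]
    by_cases hk2' : k / 2 = 0
    · -- k = 1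
      have hk : k = 1 := by omega
      subst hk
      rw [hk2', Nat.add_zero, binChars_pow, binChars_one]
      simp
    · have hhalf1 : 1 ≤ k / 2 := by omega
      have hhalf2 : k / 2 < 2^j := by omega
      rw [ih (k/2) hhalf1 hhalf2]
      have hkeq : binChars k = binChars (k/2) ++ [if k % 2 = 1 then '1' else '0'] :=
        binChars_eq k hk1
      rw [hkeq]
      have hlen : (binChars (k/2) ++ [if k % 2 = 1 then '1' else '0']).length
          = (binChars (k/2)).length + 1 := by simp
      rw [hlen]
      have h2 : j + 1 - ((binChars (k/2)).length + 1) = j - (binChars (k/2)).length := by omega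
      rw [h2]
      simp

lemma padList_zero (j : Nat) (hj : 1 ≤ j) : padList j 0 = List.replicate j '0' := by
  rw [padList, bitsOf, if_pos rfl]
  simp only [List.length_cons, List.length_nil]
  rw [show (List.replicate (j - 1) '0' ++ ['0'] : List Char)
      = List.replicate (j - 1) '0' ++ List.replicate 1 '0' from rfl,
    ← List.replicate_add]
  congr 1; omega

lemma pad0 (j k : Nat) (hj : 1 ≤ j) (hk : k < 2^j) : padList (j+1) k = '0' :: padList j k := by
  have hL := bitsOf_length_le j k hj hk
  rw [padList, padList, show j + 1 - (bitsOf k).length = (j - (bitsOf k).length) + 1 by omega,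
     List.replicate_succ]
  rfl

lemma pad1 (j k : Nat) (hj : 1 ≤ j) (hk : k < 2^j) :
    padList (j+1) (2^j + k) = '1' :: padList j k := by
  have hne : 2^j + k ≠ 0 := by
    have := Nat.one_le_two_pow (n := j); omega
  by_cases h0 : k = 0
  · subst h0
    simp only [Nat.add_zero] at hne ⊢
    rw [padList, bitsOf, if_neg hne, binChars_pow]
    simp only [List.length_cons, List.length_replicate]
    rw [show j + 1 - (j + 1) = 0 by omega, padList_zero j hj]
    rfl
  · have hk1 : 1 ≤ k := by omega
    have hb := binChars_pow_add j k hk1 hk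
    have hLle : (binChars k).length ≤ j := by
      have := bitsOf_length_le j k hj hk
      rwa [bitsOf, if_neg h0] at this
    rw [padList, bitsOf, if_neg hne, hb]
    have hlen : ('1' :: (List.replicate (j - (binChars k).length) '0' ++ binChars k)).length
        = j + 1 := by simp; omega
    rw [hlen, show j + 1 - (j + 1) = 0 by omega, padList, bitsOf, if_neg h0]
    rfl

lemma length_iter (j : Nat) : (iter j).length = 2^j := by simp [iter]

lemma step_iter (j : Nat) (hj : 1 ≤ j) :
    (['0', '1'] : List Char).flatMap (fun b => (iter j).map (fun c => b :: c)) = iter (j+1) := by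
  have hrange : List.range (2^(j+1))
      = List.range (2^j) ++ (List.range (2^j)).map (fun i => 2^j + i) := by
    rw [show (2:Nat)^(j+1) = 2^j + 2^j by ring, List.range_add]
  simp only [List.flatMap_cons, List.flatMap_nil, List.append_nil, iter, hrange,
    List.map_append, List.map_map]
  congr 1
  · apply List.map_congr_left
    intro k hk
    exact (pad0 j k hj (List.mem_range.mp hk)).symm
  · apply List.map_congr_left
    intro k hk
    exact (pad1 j k hj (List.mem_range.mp hk)).symm

lemma grow_eq (t J : Nat) (hJ1 : 1 ≤ J) (ht : t ≤ 2^J) (ht2 : 2^(J-1) < t) :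
    ∀ fuel j, 1 ≤ j → j ≤ J → J ≤ j + fuel → growCodes fuel t (iter j) = iter J := by
  intro fuel
  induction fuel with
  | zero =>
    intro j _ hjJ hJj
    have : j = J := by omega
    subst this; rfl
  | succ fuel ih =>
    intro j hj1 hjJ hJj
    rw [growCodes, length_iter]
    by_cases h : 2^j < t
    · rw [if_pos h, step_iter j hj1]
      have hjJ' : j + 1 ≤ J := by
        rcases Nat.lt_or_ge j J with hlt | hge
        · omega
        · exfalso
          have : 2^J ≤ 2^j := Nat.pow_le_pow_right (by norm_num) hge
          omega
      exact ih (j+1) (by omega) hjJ' (by omega)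
    · rw [if_neg h]
      have h1 : 2^(J-1) < 2^j := by omega
      have h2 : J - 1 < j := (Nat.pow_lt_pow_iff_right (by norm_num)).mp h1
      have : j = J := by omega
      subst this; rfl

-- the common 'max_bits' of both ports, as a Nat
lemma maxbits_eq (n : Nat) (hn : 1 ≤ n) :
    num_bits ((n : Int) - 1) = ((max 1 (PySem.Int.bitLength ((n : Int) - 1)) : Nat) : Int) := by
  rcases eq_or_lt_of_le hn with h1 | h2
  · simp [← h1, num_bits, PySem.Int.bitLength]
  · have hm : 1 ≤ n - 1 := by omega
    have hcast : (n : Int) - 1 = ((n - 1 : Nat) : Int) := by omega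
    rw [hcast, bitLength_natCast_eq (n-1) hm, num_bits]
    have : ((n - 1 : Nat) : Int) ≠ 0 := by
      intro h; have : (n - 1 : Nat) = 0 := by exact_mod_cast h
      omega
    rw [if_neg this]
    simp [Int.toNat_natCast]

lemma len_pyFormatBin0 (k : Nat) (w : Nat) (hk : Nat.log 2 k + 1 ≤ w ∨ (k = 0 ∧ 1 ≤ w)) :
    PySem.Str.len (pyFormatBin0 (k : Int) w) = (w : Int) := by
  have hlen : (if (k : Int) = 0 then ['0'] else binChars (k : Int).toNat).length ≤ w := by
    by_cases h0 : k = 0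
    · subst h0; simp; omega
    · have : ((k : Int)) ≠ 0 := by exact_mod_cast h0
      rw [if_neg this, Int.toNat_natCast, binChars_length k (Nat.one_le_iff_ne_zero.mpr h0)]
      rcases hk with h | ⟨h, _⟩
      · exact h
      · exact absurd h h0
  simp only [pyFormatBin0, PySem.Str.len]
  rw [String.toList_ofList]
  simp only [List.length_append, List.length_replicate]
  omega

lemma iter_one : iter 1 = [['0'], ['1']] := by
  have h0 : padList 1 0 = ['0'] := by simp [padList, bitsOf]
  have h1 : padList 1 1 = ['1'] := by simp [padList, bitsOf, binChars_one]
  show (List.range 2).map (padList 1) = [['0'], ['1']]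
  rw [show List.range 2 = [0, 1] from rfl]
  simp [h0, h1]

-- ===== VERDICT (by name: the statement is the Claim_ definition above) =====
theorem fixed_length_encoding_spec : Claim_equal_fixed_length_encoding := by
  intro freq_dict _ hpre
  obtain ⟨hne, hnd⟩ := hpre
  simp only [Spec_fixed_length_encoding, fixed_length_encoding, fixed_length_encoding_alt]
  set symbols := freq_dict.map Prod.fst with hsym
  have hn : 1 ≤ symbols.length := by
    rcases freq_dict with _ | ⟨p, t⟩
    · exact absurd rfl hne
    · simp [hsym]
  set W : Nat := max 1 (PySem.Int.bitLength ((symbols.length : Int) - 1)) with hW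
  have hW1 : 1 ≤ W := le_max_left _ _
  have hmb : num_bits ((symbols.length : Int) - 1) = (W : Int) := maxbits_eq symbols.length hn
  have hmbt : (num_bits ((symbols.length : Int) - 1)).toNat = W := by
    rw [hmb]; exact Int.toNat_natCast W
  -- the target and width bounds
  have hbounds : max symbols.length 2 ≤ 2^W ∧ 2^(W-1) < max symbols.length 2 := by
    rcases eq_or_lt_of_le hn with h1 | h2
    · have hWeq : W = 1 := by
        rw [hW, ← h1]
        decide
      rw [hWeq, ← h1]
      norm_num
    · have hm : 1 ≤ symbols.length - 1 := by omega
      have hcast : (symbols.length : Int) - 1 = ((symbols.length - 1 : Nat) : Int) := by omega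
      have hWval : W = Nat.log 2 (symbols.length - 1) + 1 := by
        rw [hW, hcast, bitLength_natCast_eq _ hm]; omega
      constructor
      · have hlt : symbols.length - 1 < 2 ^ W := by
          rw [hWval]
          exact Nat.lt_pow_succ_log_self (by norm_num) (symbols.length - 1)
        have h2W : 2 ≤ 2^W := by
          calc 2 = 2^1 := rfl
          _ ≤ 2^W := Nat.pow_le_pow_right (by norm_num) hW1
        omega
      · have hle := Nat.pow_log_le_self 2 (Nat.one_le_iff_ne_zero.mp hm)
        have hWm : W - 1 = Nat.log 2 (symbols.length - 1) := by omega
        rw [hWm]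
        omega
  -- the code table B builds is iter W
  have hgrow : growCodes (max symbols.length 2 + 1) (max symbols.length 2) [[]] = iter W := by
    have ht2 : 2 ≤ max symbols.length 2 := le_max_right _ _
    rw [growCodes, if_pos (by simp only [List.length_cons, List.length_nil]; omega)]
    have hstep : (['0', '1'] : List Char).flatMap
        (fun b => ([[]] : List (List Char)).map (fun c => b :: c)) = iter 1 := by
      rw [iter_one]; rfl
    rw [hstep]
    have hx : W - 1 < 2^(W-1) := Nat.lt_two_pow_self
    exact grow_eq (max symbols.length 2) W hW1 hbounds.1 hbounds.2
      (max symbols.length 2) 1 le_rfl hW1 (by omega)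
  rw [hgrow]
  set d : PySem.Dict String String := (PySem.List.enumerate symbols).foldl
      (fun d p => d.insert p.2 (pyFormatBin0 p.1 (num_bits ((symbols.length : Int) - 1)).toNat))
      PySem.Dict.empty with hd
  -- the dict A builds: insertions over fresh distinct keys append
  have hitems : d.items = (PySem.List.enumerate symbols).map
      (fun p => (p.2, pyFormatBin0 p.1 W)) := by
    rw [hd]
    have h := PySem.Dict.items_foldl_insert_fresh
        (PySem.List.enumerate symbols) (fun p => p.2)
        (fun p => pyFormatBin0 p.1 (num_bits ((symbols.length : Int) - 1)).toNat)
        PySem.Dict.empty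
        (by intro a _; exact PySem.Dict.contains_empty _)
        (by rw [PySem.List.map_snd_enumerate]; exact hnd)
    rw [h, show (PySem.Dict.empty : PySem.Dict String String).items = [] from rfl,
       List.nil_append]
    simp only [hmbt]
  have hdnd : d.keys.Nodup := by
    rw [hd]
    exact PySem.Dict.nodup_keys_foldl_insert_key (ν := String)
      (PySem.List.enumerate symbols) (fun p => p.2)
      (fun _ p => pyFormatBin0 p.1 (num_bits ((symbols.length : Int) - 1)).toNat)
      PySem.Dict.empty PySem.Dict.nodup_keys_empty
  -- B's dict: insertions over the zip's fresh distinct keys append too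
  set cs : List String := (iter W).map String.ofList with hcs
  have hcslen : symbols.length ≤ cs.length := by
    rw [hcs]
    simp only [List.length_map, length_iter]
    calc symbols.length ≤ max symbols.length 2 := le_max_left _ _
    _ ≤ 2^W := hbounds.1
  have hzipfst : (symbols.zip cs).map Prod.fst = symbols := List.map_fst_zip hcslen
  have hitemsB : ((symbols.zip cs).foldl
      (fun d p => d.insert p.1 p.2) (PySem.Dict.empty : PySem.Dict String String)).items
      = symbols.zip cs := by
    have h := PySem.Dict.items_foldl_insert_fresh
        (symbols.zip cs) Prod.fst Prod.snd PySem.Dict.empty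
        (by intro a _; exact PySem.Dict.contains_empty _)
        (by rw [hzipfst]; exact hnd)
    rw [h, show (PySem.Dict.empty : PySem.Dict String String).items = [] from rfl,
       List.nil_append]
    simp
  -- the two item lists coincide
  have hitemsEq : d.items = symbols.zip cs := by
    rw [hitems]
    apply List.ext_getElem
    · simp only [List.length_map, PySem.List.length_enumerate, List.length_zip]
      omega
    · intro k hk1 hk2
      have hklt : k < symbols.length := by
        simpa [PySem.List.length_enumerate] using hk1
      rw [List.getElem_map, PySem.List.getElem_enumerate, List.getElem_zip]
      have hkcs : k < cs.length := by omega
      have hkI : k < (iter W).length := by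
        rw [length_iter]
        calc k < symbols.length := hklt
        _ ≤ 2^W := le_trans (le_max_left _ _) hbounds.1
      have hcsk : cs[k]'hkcs = String.ofList (padList W k) := by
        simp only [hcs, iter, List.getElem_map, List.getElem_range]
      rw [hcsk]
      have h0k : (0 : Int) + (k : Int) = ((k : Nat) : Int) := by ring
      rw [h0k, pyFormatBin0_natCast]
  -- every lookup of a key of freq_dict yields a code of length W
  have hWlog : ∀ k : Nat, k < symbols.length → Nat.log 2 k + 1 ≤ W ∨ (k = 0 ∧ 1 ≤ W) := by
    intro k hklt
    by_cases h0 : k = 0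
    · right; exact ⟨h0, hW1⟩
    · left
      have hm : 1 ≤ symbols.length - 1 := by omega
      have hcast : ((symbols.length : Int) - 1) = ((symbols.length - 1 : Nat) : Int) := by omega
      have hWval : W = Nat.log 2 (symbols.length - 1) + 1 := by
        rw [hW, hcast, bitLength_natCast_eq _ hm]; omega
      have : Nat.log 2 k ≤ Nat.log 2 (symbols.length - 1) :=
        Nat.log_mono_right (by omega)
      omega
  have hlook : ∀ p ∈ freq_dict, PySem.Str.len (d.getD p.1 "") = (W : Int) := by
    intro p hp
    have hmem : p.1 ∈ symbols := List.mem_map_of_mem hp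
    obtain ⟨k, hk, hkeq⟩ := List.mem_iff_getElem.mp hmem
    have henum : ((0 : Int) + (k : Int), symbols[k]) ∈ PySem.List.enumerate symbols 0 :=
      (PySem.List.mem_enumerate_iff symbols 0 _).mpr ⟨k, hk, rfl⟩
    have hpair : (symbols[k], pyFormatBin0 ((0 : Int) + (k : Int)) W) ∈ d.items := by
      rw [hitems]
      exact List.mem_map.mpr ⟨_, henum, rfl⟩
    rw [hkeq] at hpair
    rw [PySem.Dict.getD_of_mem_items d hpair hdnd]
    rw [show (0 : Int) + (k : Int) = (k : Int) by ring]
    exact len_pyFormatBin0 k W (hWlog k hk)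
  -- A's second pass equals W * sum(values)
  have hsnd : freq_dict.foldl (fun acc p => acc + p.2 * PySem.Str.len (d.getD p.1 "")) 0
      = (W : Int) * (freq_dict.map Prod.snd).sum := by
    rw [PySem.List.foldl_congr_mem freq_dict _ (fun acc p => acc + p.2 * (W : Int)) 0
        (by intro acc p hp; rw [hlook p hp])]
    rw [PySem.List.foldl_add freq_dict (fun p => p.2 * (W : Int)) 0, zero_add]
    rw [show (freq_dict.map (fun p => p.2 * (W : Int))).sum
        = (freq_dict.map Prod.snd).sum * (W : Int) by rw [← List.sum_map_mul_right]]
    rw [mul_comm]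
  -- B's first code has length W
  have hhead : ((((iter W).headD []).length : Nat) : Int) = (W : Int) := by
    have h2W : 1 ≤ 2^W := Nat.one_le_two_pow
    have hiter : iter W = padList W 0 :: ((List.range' 1 (2^W - 1)).map (padList W)) := by
      rw [iter, show List.range (2^W) = 0 :: List.range' 1 (2^W - 1) by
        rw [List.range_eq_range']
        rcases Nat.exists_eq_add_of_le h2W with ⟨m, hm⟩
        rw [hm, show 1 + m = m + 1 by omega, show m + 1 - 1 = m by omega, List.range'_succ]]
      simp
    rw [hiter]
    simp only [List.headD_cons]
    rw [padList_zero W hW1]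
    simp
  refine Prod.ext ?_ ?_
  · rw [hitemsB]
    exact hitemsEq
  · rw [hsnd, hhead]
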